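-- pv_equiv track=rewrite | github.com/FarheenSayed/FLAMES | Flames.py | flames_game
-- ===== SOURCE A (Python) =====
-- def flames_game(player1name, player2name):
--     # Convert names to lowercase and remove spaces
--     player1name = player1name.lower().replace(" ", "")
--     player2name = player2name.lower().replace(" ", "")
--
--     # Remove common characters
--     common_chars = set(player1name) & set(player2name)
--     for char in common_chars:
--         player1name = player1name.replace(char, "")
--         player2name = player2name.replace(char, "")
--
--     # Get the count of characters left
--     count = len(player1name) + len(player2name)
--
--     # Initialize Flames letters
--     flames = ["F", "L", "A", "M", "E", "S"]
--
--     # Start removing letters using the count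
--     index = 0
--     while len(flames) > 1:
--         index = (index + count - 1) % len(flames)
--         flames.pop(index)
--
--     # The last letter is the result
--     result = flames[0]
--
--     # Map the result to the corresponding status
--     status_map = {
--         "F": "Friends",
--         "L": "Lovers",
--         "A": "Affectionate",
--         "M": "Marriage",
--         "E": "Enemies",
--         "S": "Siblings"
--     }
--
--     return status_map[result]
-- ===== SOURCE B (Python) =====
-- def flames_game(player1name, player2name):
--     # identical normalization and common-character removal (same count as A)
--     player1name = player1name.lower().replace(" ", "")
--     player2name = player2name.lower().replace(" ", "")
--     common_chars = set(player1name) & set(player2name)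
--     for char in common_chars:
--         player1name = player1name.replace(char, "")
--         player2name = player2name.replace(char, "")
--     count = len(player1name) + len(player2name)
--     # Josephus survivor recurrence instead of simulating pops on a shrinking list
--     pos = 0
--     for i in range(2, 7):
--         pos = (pos + count) % i
--     return ["Friends", "Lovers", "Affectionate", "Marriage", "Enemies", "Siblings"][pos]
-- ===== Notes on version B (the rewrite author's own statement) =====
-- stated objective: alternative
-- what changed: The while-loop that repeatedly pops letters from the FLAMES list is replaced by the closed Josephus survivor recurrence pos=(pos+count)%i for i=2..6, indexing a fixed status list directly instead of shrinking a list and mapping through a dict.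
import Mathlib
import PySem

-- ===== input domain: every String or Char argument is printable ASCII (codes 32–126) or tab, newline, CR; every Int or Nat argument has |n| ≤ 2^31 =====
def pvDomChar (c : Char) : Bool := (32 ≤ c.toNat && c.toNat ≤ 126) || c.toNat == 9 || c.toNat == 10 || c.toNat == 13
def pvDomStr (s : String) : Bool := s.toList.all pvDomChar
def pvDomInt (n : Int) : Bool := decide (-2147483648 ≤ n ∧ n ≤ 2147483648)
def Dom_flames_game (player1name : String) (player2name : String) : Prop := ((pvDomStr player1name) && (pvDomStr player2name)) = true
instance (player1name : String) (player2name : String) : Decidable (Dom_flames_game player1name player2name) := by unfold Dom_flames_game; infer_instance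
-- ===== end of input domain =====

-- B replaces A's shrinking-list FLAMES simulation by the Josephus survivor recurrence
-- (pos = (pos+count) % i for i = 2..6) and a direct status-list index; same normalization.


-- ===== PORT A =====
-- A's while-loop: while len(flames) > 1: index = (index+count-1) % len(flames); flames.pop(index)
-- (fuel = initial list length; each iteration pops one element, so it never runs out)
def pvFlamesWhile : Nat → List String → Int → Int → List String
  | 0, flames, _, _ => flames
  | fuel+1, flames, index, count =>
    if 1 < flames.length then
      let idx := PySem.Int.mod (index + count - 1) (flames.length : Int)
      match PySem.List.pop? flames idx with
      | some r => pvFlamesWhile fuel r.2 idx count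
      | none => flames   -- unreachable: idx ∈ [0, len)
    else flames

-- tail of A after count is fixed: the simulation, flames[0], and the status_map lookup
def pvFlamesList : List String := ["F", "L", "A", "M", "E", "S"]

def pvStatusMap : PySem.Dict String String :=
  PySem.Dict.mk [("F", "Friends"), ("L", "Lovers"), ("A", "Affectionate"),
                 ("M", "Marriage"), ("E", "Enemies"), ("S", "Siblings")]

def pvSimPart (count : Int) : String :=
  -- flames[0] and status_map[result] never raise (the survivor list is nonempty and its
  -- element is a key), so the .getD "" defaults are unreachable
  (PySem.Dict.get? pvStatusMap
    ((PySem.List.pyGet? (pvFlamesWhile pvFlamesList.length pvFlamesList 0 count) 0).getD "")).getD ""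

-- the common normalization/removal: returns `count` (order of the set fold cannot affect it)
def pvCount (player1name : String) (player2name : String) : Int :=
  let p1 := PySem.Str.replace (PySem.Str.lower player1name) " " ""
  let p2 := PySem.Str.replace (PySem.Str.lower player2name) " " ""
  let common := PySem.Set.inter (PySem.Set.ofList p1.toList) (PySem.Set.ofList p2.toList)
  let pq := common.foldl (fun (pr : String × String) ch =>
      (PySem.Str.replace pr.1 (String.ofList [ch]) "", PySem.Str.replace pr.2 (String.ofList [ch]) "")) (p1, p2)
  (PySem.Str.len pq.1 : Int) + (PySem.Str.len pq.2 : Int)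

def flames_game (player1name : String) (player2name : String) : String :=
  pvSimPart (pvCount player1name player2name)

-- ===== PORT B =====
-- tail of B: Josephus recurrence over range(2,7), then direct index into the status list
def pvJosPart (count : Int) : String :=
  (PySem.List.pyGet? ["Friends", "Lovers", "Affectionate", "Marriage", "Enemies", "Siblings"]
    ((PySem.List.pyRange 2 7 1).foldl (fun pos i => PySem.Int.mod (pos + count) i) 0)).getD ""
  -- never raises: the final fold step is a mod 6, so the index is in [0, 6)

def flames_game_alt (player1name : String) (player2name : String) : String :=
  pvJosPart (pvCount player1name player2name)

-- ===== PRECONDITION & SPEC =====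
def Spec_flames_game (player1name : String) (player2name : String) (out : String) : Prop := out = flames_game_alt player1name player2name
instance (player1name : String) (player2name : String) (out : String) : Decidable (Spec_flames_game player1name player2name out) := by unfold Spec_flames_game; infer_instance

-- ===== CLAIM (what is proved, stated in full; the proofs are below) =====
def Claim_equal_flames_game : Prop := ∀ (player1name : String) (player2name : String), Dom_flames_game player1name player2name → Spec_flames_game player1name player2name (flames_game player1name player2name)

-- ===== LEMMAS AND PROOFS =====

lemma pvMod_congr (p c c' n : Int) (hn : 0 < n) (hd : n ∣ 60)
    (h : c % 60 = c' % 60) : PySem.Int.mod (p + c) n = PySem.Int.mod (p + c') n := by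
  rw [PySem.Int.mod_eq_emod_of_pos hn, PySem.Int.mod_eq_emod_of_pos hn]
  have hc : c % n = c' % n := by
    rw [← Int.emod_emod_of_dvd c hd, ← Int.emod_emod_of_dvd c' hd, h]
  have : (p + c) % n = (p + c') % n := by
    conv_lhs => rw [Int.add_emod, hc, ← Int.add_emod]
  simpa using this

lemma pvWhile_congr (fuel : Nat) (fl : List String) (idx c c' : Int)
    (h6 : fl.length ≤ 6) (h : c % 60 = c' % 60) :
    pvFlamesWhile fuel fl idx c = pvFlamesWhile fuel fl idx c' := by
  induction fuel generalizing fl idx with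
  | zero => rfl
  | succ n ih =>
    simp only [pvFlamesWhile]
    by_cases hl : 1 < fl.length
    · simp only [hl, if_true]
      have hdvd : (fl.length : Int) ∣ 60 := by interval_cases hle : fl.length <;> omega
      have hmod : PySem.Int.mod (idx + c - 1) (fl.length : Int)
          = PySem.Int.mod (idx + c' - 1) (fl.length : Int) := by
        have := pvMod_congr (idx - 1) c c' (fl.length : Int) (by exact_mod_cast Nat.lt_of_lt_of_le Nat.zero_lt_one (le_of_lt hl)) hdvd h
        simpa [add_sub_assoc, add_comm, add_left_comm, sub_eq_add_neg, add_assoc] using this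
      rw [hmod]
      cases hp : PySem.List.pop? fl (PySem.Int.mod (idx + c' - 1) (fl.length : Int)) with
      | none => rfl
      | some r =>
        have hlen := PySem.List.length_of_pop?_eq_some _ hp
        exact ih r.2 _ (by omega)
    · simp [hl]

lemma pvJos_congr (c c' : Int) (h : c % 60 = c' % 60) : pvJosPart c = pvJosPart c' := by
  have hr : PySem.List.pyRange 2 7 1 = [2, 3, 4, 5, 6] := by decide
  unfold pvJosPart
  rw [hr]
  simp only [List.foldl]
  rw [pvMod_congr 0 c c' 2 (by omega) (by omega) h,
      pvMod_congr _ c c' 3 (by omega) (by omega) h,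
      pvMod_congr _ c c' 4 (by omega) (by omega) h,
      pvMod_congr _ c c' 5 (by omega) (by omega) h,
      pvMod_congr _ c c' 6 (by omega) (by omega) h]

lemma pvSmall_cases : ∀ r : Nat, r < 60 → pvSimPart (r : Int) = pvJosPart (r : Int) := by decide

lemma pvMain (c : Int) : pvSimPart c = pvJosPart c := by
  have hmod : (c % 60) % 60 = c % 60 := Int.emod_emod_of_dvd c dvd_rfl
  have hnn : 0 ≤ c % 60 := Int.emod_nonneg c (by omega)
  have hlt : c % 60 < 60 := Int.emod_lt_of_pos c (by omega)
  have hsim : pvSimPart c = pvSimPart (c % 60) := by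
    unfold pvSimPart
    rw [pvWhile_congr _ _ _ c (c % 60) (by decide) hmod.symm]
  have hjos : pvJosPart (c % 60) = pvJosPart c := pvJos_congr _ _ hmod
  rw [hsim, ← hjos]
  have h' : c % 60 = ((c % 60).toNat : Int) := (Int.toNat_of_nonneg hnn).symm
  rw [h']
  exact pvSmall_cases _ (by omega)

-- ===== VERDICT (by name: the statement is the Claim_ definition above) =====
theorem flames_game_spec : Claim_equal_flames_game := by
  intro p1 p2 _
  unfold Spec_flames_game flames_game flames_game_alt
  exact pvMain _
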